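-- pv_equiv track=rewrite | github.com/HariPrasathuv/BooleanFunctionFromMinTerm | BooleanFunctionSimplifier.py | produceCombinationFromMinterms
-- ===== SOURCE A (Python) =====
-- def produceCombinationFromMinterms(minterms,n):
--     comb=[]
--     for i in minterms:
--         st = ""
--         for j in range(n):
--             st = str(i%2) + st
--             i//=2
--         comb.append(st)
--     return comb
-- ===== SOURCE B (Python) =====
-- def produceCombinationFromMinterms(minterms, n):
--     # zero (or negative) width: every minterm maps to the empty string
--     if n <= 0:
--         return [""] * len(minterms)
--     # n low bits of i (Python % floors, so this also handles negative minterms),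
--     # rendered in one library formatting call instead of a per-bit loop
--     return [format(i % (2 ** n), "b").zfill(n) for i in minterms]
-- ===== Notes on version B (the rewrite author's own statement) =====
-- stated objective: faster
-- what changed: B replaces A's per-minterm inner Python loop (repeated halving plus quadratic string prepending) with a single closed-form reduction i % 2**n followed by one library binary-formatting call format(..., 'b').zfill(n) per minterm.
import Mathlib
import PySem

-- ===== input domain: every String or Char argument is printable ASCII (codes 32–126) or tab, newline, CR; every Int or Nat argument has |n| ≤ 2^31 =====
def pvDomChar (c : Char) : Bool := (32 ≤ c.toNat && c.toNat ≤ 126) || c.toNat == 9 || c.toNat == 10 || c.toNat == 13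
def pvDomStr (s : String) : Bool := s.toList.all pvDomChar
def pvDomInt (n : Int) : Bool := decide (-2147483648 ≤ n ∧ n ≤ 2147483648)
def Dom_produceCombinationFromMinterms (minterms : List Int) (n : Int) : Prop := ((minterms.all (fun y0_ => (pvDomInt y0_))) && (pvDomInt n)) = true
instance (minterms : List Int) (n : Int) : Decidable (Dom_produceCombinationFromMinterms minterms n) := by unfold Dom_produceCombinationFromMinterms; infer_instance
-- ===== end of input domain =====

-- B replaces A's per-bit inner loop (repeated string prepending and halving) by one
-- closed-form mod + library binary-formatting call per minterm (objective: idiomatic).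

-- ===== PORT A =====
-- one iteration of A's inner loop body: st = str(i%2) + st; i //= 2
-- (the growing string is carried as List Char — exact, the characters are ASCII digits)
def pvStepA (s : List Char × Int) : List Char × Int :=
  (PySem.Int.toChars (PySem.Int.mod s.2 2) ++ s.1, PySem.Int.floordiv s.2 2)

def produceCombinationFromMinterms (minterms : List Int) (n : Int) : List String :=
  minterms.foldl
    (fun comb i =>
      comb ++ [String.ofList ((PySem.List.pyRange 0 n).foldl (fun s _ => pvStepA s) ([], i)).1])
    []

-- ===== PORT B =====
def produceCombinationFromMinterms_alt (minterms : List Int) (n : Int) : List String :=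
  if n ≤ 0 then List.replicate minterms.length ""
  else
    minterms.map (fun i =>
      PySem.Str.zfill (PySem.Int.toBin (PySem.Int.mod i ((2 : Int) ^ n.toNat))) n)

-- ===== PRECONDITION & SPEC =====
def Spec_produceCombinationFromMinterms (minterms : List Int) (n : Int) (out : List String) : Prop := out = produceCombinationFromMinterms_alt minterms n
instance (minterms : List Int) (n : Int) (out : List String) : Decidable (Spec_produceCombinationFromMinterms minterms n out) := by unfold Spec_produceCombinationFromMinterms; infer_instance

-- ===== CLAIM (what is proved, stated in full; the proofs are below) =====
def Claim_equal_produceCombinationFromMinterms : Prop := ∀ (minterms : List Int) (n : Int), Dom_produceCombinationFromMinterms minterms n → Spec_produceCombinationFromMinterms minterms n (produceCombinationFromMinterms minterms n)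

-- ===== LEMMAS AND PROOFS =====

-- binary digits of a natural number, MSB first (the value of `Nat.toDigits 2`)
def pvBitsAux (m : Nat) : List Char :=
  if _h : m < 2 then [Nat.digitChar m]
  else pvBitsAux (m / 2) ++ [Nat.digitChar (m % 2)]
decreasing_by omega

-- the k low bits of an integer, MSB first (what A's inner loop accumulates)
def pvBitsI : Nat → Int → List Char
  | 0, _ => []
  | k + 1, i => pvBitsI k (PySem.Int.floordiv i 2) ++ [Nat.digitChar (PySem.Int.mod i 2).toNat]

lemma pvToDigitsCore_eq (f : Nat) : ∀ (m : Nat) (acc : List Char), m < f →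
    Nat.toDigitsCore 2 f m acc = pvBitsAux m ++ acc := by
  induction f with
  | zero => intro m acc h; omega
  | succ f ih =>
    intro m acc h
    rw [Nat.toDigitsCore, pvBitsAux]
    by_cases h2 : m / 2 = 0
    · rw [if_pos h2, dif_pos (by omega)]
      have : m % 2 = m := by omega
      simp [this]
    · rw [if_neg h2, dif_neg (by omega), ih (m / 2) _ (by omega)]
      simp

lemma pvToDigits_two (m : Nat) : Nat.toDigits 2 m = pvBitsAux m := by
  rw [Nat.toDigits]
  simpa using pvToDigitsCore_eq (m + 1) m [] (by omega)

lemma pvBitsAux_mem (m : Nat) : ∀ c ∈ pvBitsAux m, c = '0' ∨ c = '1' := by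
  induction m using Nat.strong_induction_on with
  | _ m ih =>
    intro c hc
    rw [pvBitsAux] at hc
    by_cases h : m < 2
    · rw [dif_pos h] at hc
      simp at hc
      rcases (by omega : m = 0 ∨ m = 1) with rfl | rfl <;> subst hc <;> decide
    · rw [dif_neg h] at hc
      rcases List.mem_append.1 hc with h1 | h1
      · exact ih (m / 2) (by omega) c h1
      · have hm : m % 2 = 0 ∨ m % 2 = 1 := by omega
        rcases hm with hm | hm <;> rw [hm] at h1 <;> simp at h1 <;> subst h1 <;> decide

lemma pvBitsAux_ne_nil (m : Nat) : pvBitsAux m ≠ [] := by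
  rw [pvBitsAux]; split_ifs <;> simp

lemma pvZfill_digits (cs : List Char) (k : Nat) (h1 : cs ≠ [])
    (h2 : ∀ c ∈ cs, c = '0' ∨ c = '1') :
    PySem.Chars.zfill cs (k : Int) = List.replicate (k - cs.length) '0' ++ cs := by
  match cs with
  | [] => exact absurd rfl h1
  | c :: rest =>
    rw [PySem.Chars.zfill]
    by_cases hle : (k : Int) ≤ ((c :: rest).length : Int)
    · rw [if_pos hle]
      have hz : k - (rest.length + 1) = 0 := by
        simp at hle; omega
      simp [hz]
    · rw [if_neg hle]
      have hc : ¬ (c = '+' ∨ c = '-') := by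
        rcases h2 c (List.mem_cons_self) with h | h <;> simp [h]
      rw [if_neg hc]
      simp

lemma pvKey (k : Nat) (i : Int) :
    PySem.Int.mod i ((2 : Int) ^ (k + 1)) =
      2 * PySem.Int.mod (PySem.Int.floordiv i 2) ((2 : Int) ^ k) + PySem.Int.mod i 2 := by
  have hp : (0 : Int) < 2 ^ k := by positivity
  have hp1 : (0 : Int) < 2 ^ (k + 1) := by positivity
  rw [PySem.Int.mod_eq_emod_of_pos hp1, PySem.Int.mod_eq_emod_of_pos hp,
    PySem.Int.mod_eq_emod_of_pos (by norm_num), PySem.Int.floordiv_eq_ediv_of_pos (by norm_num)]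
  rw [Int.emod_def, Int.emod_def, Int.emod_def]
  have hdd : i / ((2 : Int) ^ (k + 1)) = i / 2 / 2 ^ k := by
    rw [show ((2 : Int) ^ (k + 1)) = 2 * 2 ^ k by ring]
    exact (Int.ediv_ediv_of_nonneg (by norm_num)).symm
  rw [hdd]; ring

lemma pvReplicate_last (k : Nat) (hk : 1 ≤ k) :
    List.replicate (k - 1) '0' ++ ['0'] = List.replicate k '0' := by
  have : k = (k - 1) + 1 := by omega
  rw [this, List.replicate_add]
  simp

lemma pvBitsI_eq (k : Nat) : ∀ (i : Int), 1 ≤ k →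
    PySem.Chars.zfill (PySem.Int.toBinChars (PySem.Int.mod i ((2 : Int) ^ k))) (k : Int) =
      pvBitsI k i := by
  induction k with
  | zero => intro i h; omega
  | succ k ih =>
    intro i _
    have hb0 : 0 ≤ PySem.Int.mod i 2 := PySem.Int.mod_nonneg i (by norm_num)
    have hb1 : PySem.Int.mod i 2 < 2 := PySem.Int.mod_lt i (by norm_num)
    by_cases hk0 : k = 0
    · subst hk0
      have hp2 : ((2 : Int) ^ (0 + 1)) = 2 := by norm_num
      rw [hp2]
      rw [show pvBitsI (0 + 1) i = [(PySem.Int.mod i 2).toNat.digitChar] from by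
        rw [pvBitsI, pvBitsI]; simp]
      rcases (by omega : PySem.Int.mod i 2 = 0 ∨ PySem.Int.mod i 2 = 1) with h | h <;>
        rw [h] <;> decide
    · have hk1 : 1 ≤ k := by omega
      have hp : (0 : Int) < 2 ^ k := by positivity
      have hp1 : (0 : Int) < 2 ^ (k + 1) := by positivity
      have hM0 : 0 ≤ PySem.Int.mod i ((2 : Int) ^ (k + 1)) := PySem.Int.mod_nonneg i hp1
      have hm'0 : 0 ≤ PySem.Int.mod (PySem.Int.floordiv i 2) ((2 : Int) ^ k) :=
        PySem.Int.mod_nonneg _ hp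
      have hkey := pvKey k i
      set M : Nat := (PySem.Int.mod i ((2 : Int) ^ (k + 1))).toNat with hMdef
      set m' : Nat := (PySem.Int.mod (PySem.Int.floordiv i 2) ((2 : Int) ^ k)).toNat with hm'def
      set b : Nat := (PySem.Int.mod i 2).toNat with hbdef
      have hMeq : M = 2 * m' + b := by omega
      have hbin : PySem.Int.toBinChars (PySem.Int.mod i ((2 : Int) ^ (k + 1))) = pvBitsAux M := by
        rw [PySem.Int.toBinChars, if_neg (by omega), pvToDigits_two]
      rw [hbin]
      show PySem.Chars.zfill (pvBitsAux M) ((k + 1 : Nat) : Int) = _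
      rw [pvZfill_digits _ _ (pvBitsAux_ne_nil M) (pvBitsAux_mem M)]
      rw [show pvBitsI (k + 1) i
          = pvBitsI k (PySem.Int.floordiv i 2) ++ [Nat.digitChar b] from by rw [pvBitsI]]
      rw [← ih (PySem.Int.floordiv i 2) hk1]
      rw [PySem.Int.toBinChars, if_neg (by omega), pvToDigits_two]
      rw [pvZfill_digits _ _ (pvBitsAux_ne_nil m') (pvBitsAux_mem m')]
      by_cases hM2 : M < 2
      · -- high bits are all zero
        have hb2 : b < 2 := by omega
        have hm'z : m' = 0 := by omega
        have hbM : b = M := by omega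
        have hA : pvBitsAux M = [Nat.digitChar M] := by
          conv_lhs => rw [pvBitsAux]
          rw [dif_pos hM2]
        rw [hA, hm'z]
        rw [show pvBitsAux 0 = ['0'] from by rw [pvBitsAux]; rw [dif_pos (by omega)]; rfl]
        simp only [List.length_singleton]
        rw [pvReplicate_last k hk1, hbM]
        have hkk : k + 1 - 1 = k := by omega
        rw [hkk]
      · -- M ≥ 2: peel the last bit
        have hA : pvBitsAux M = pvBitsAux (M / 2) ++ [Nat.digitChar (M % 2)] := by
          conv_lhs => rw [pvBitsAux]
          rw [dif_neg hM2]
        have h1 : M / 2 = m' := by omega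
        have h2 : M % 2 = b := by omega
        rw [hA, h1, h2]
        have hlen : k + 1 - (pvBitsAux m' ++ [Nat.digitChar b]).length
            = k - (pvBitsAux m').length := by
          simp [List.length_append]
        rw [hlen]
        simp [List.append_assoc]

lemma pvFoldl_const_iterate {α β : Type} (f : α → α) (l : List β) : ∀ (s : α),
    l.foldl (fun s _ => f s) s = f^[l.length] s := by
  induction l with
  | nil => intro s; simp
  | cons x xs ih => intro s; simp [List.foldl_cons, ih, Function.iterate_succ_apply]

lemma pvIterA (k : Nat) : ∀ (i : Int) (st : List Char),
    (pvStepA^[k] (st, i)).1 = pvBitsI k i ++ st := by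
  induction k with
  | zero => intro i st; simp [pvBitsI]
  | succ k ih =>
    intro i st
    rw [Function.iterate_succ_apply]
    have hstep : pvStepA (st, i) =
        (PySem.Int.toChars (PySem.Int.mod i 2) ++ st, PySem.Int.floordiv i 2) := rfl
    rw [hstep, ih]
    have hb0 : 0 ≤ PySem.Int.mod i 2 := PySem.Int.mod_nonneg i (by norm_num)
    have hb1 : PySem.Int.mod i 2 < 2 := PySem.Int.mod_lt i (by norm_num)
    have hchars : PySem.Int.toChars (PySem.Int.mod i 2)
        = [Nat.digitChar (PySem.Int.mod i 2).toNat] := by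
      interval_cases h : PySem.Int.mod i 2 <;> decide
    rw [pvBitsI, hchars]
    simp

lemma pvRange_neg (n : Int) (hn : n ≤ 0) : PySem.List.pyRange 0 n = [] := by
  rw [PySem.List.pyRange]
  have : ¬ (0 : Int) < n := by omega
  simp [this]

-- ===== VERDICT (by name: the statement is the Claim_ definition above) =====
theorem produceCombinationFromMinterms_spec : Claim_equal_produceCombinationFromMinterms := by
  intro minterms n _
  unfold Spec_produceCombinationFromMinterms produceCombinationFromMinterms
    produceCombinationFromMinterms_alt
  rw [PySem.List.foldl_append_singleton_eq_map]
  by_cases hn : n ≤ 0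
  · rw [if_pos hn, pvRange_neg n hn]
    simp [List.map_const']
  · rw [if_neg hn, List.nil_append]
    refine List.map_congr_left (fun i _ => ?_)
    have hnn : n = ((n.toNat : Nat) : Int) := by omega
    have hk1 : 1 ≤ n.toNat := by omega
    rw [hnn, PySem.List.pyRange_zero_natCast, pvFoldl_const_iterate]
    rw [List.length_map, List.length_range, pvIterA, List.append_nil]
    simp only [Int.toNat_natCast]
    rw [show PySem.Str.zfill (PySem.Int.toBin (PySem.Int.mod i ((2:Int) ^ n.toNat)))
          ((n.toNat : Nat) : Int)
        = String.ofList (PySem.Chars.zfill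
            (PySem.Int.toBinChars (PySem.Int.mod i ((2:Int) ^ n.toNat)))
            ((n.toNat : Nat) : Int)) from by
      rw [PySem.Str.zfill, PySem.Int.toList_toBin]]
    rw [pvBitsI_eq n.toNat i hk1]
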